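-- pv_equiv track=rewrite | github.com/Lightless-Labs/third-thoughts | middens/python/techniques/granger_causality.py | get_tool_dist
-- ===== SOURCE A (Python) =====
-- def get_tool_dist(tool_calls):
--     dist = {'read': 0, 'edit': 0, 'bash': 0, 'search': 0, 'skill': 0, 'other': 0}
--     if not tool_calls:
--         return dist
--     for call in tool_calls:
--         name = call.get('name', '').lower()
--         if any(sub in name for sub in ['read', 'glob', 'grep']): dist['read'] += 1
--         elif any(sub in name for sub in ['edit', 'write']): dist['edit'] += 1
--         elif 'bash' in name: dist['bash'] += 1
--         elif any(sub in name for sub in ['websearch', 'webfetch']): dist['search'] += 1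
--         elif 'skill' in name: dist['skill'] += 1
--         else: dist['other'] += 1
--     return dist
-- ===== SOURCE B (Python) =====
-- _BUCKETS = [
--     ('read', ('read', 'glob', 'grep')),
--     ('edit', ('edit', 'write')),
--     ('bash', ('bash',)),
--     ('search', ('websearch', 'webfetch')),
--     ('skill', ('skill',)),
-- ]
--
-- def get_tool_dist(tool_calls):
--     # Sieve: repeatedly partition the pool of names; each bucket takes (and
--     # counts) its matches, later buckets only ever see the leftovers.
--     remaining = [call.get('name', '').lower() for call in tool_calls]
--     dist = {}
--     for key, subs in _BUCKETS:
--         dist[key] = sum(1 for n in remaining if any(s in n for s in subs))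
--         remaining = [n for n in remaining if not any(s in n for s in subs)]
--     dist['other'] = len(remaining)
--     return dist
-- ===== Notes on version B (the rewrite author's own statement) =====
-- stated objective: alternative
-- what changed: Replaces A's single pass with a per-call if/elif chain mutating a dict by a sieve of staged passes: the lowered names form a pool, each bucket in priority order counts its matches in the pool and removes them, and 'other' is what is left.
import Mathlib
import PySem

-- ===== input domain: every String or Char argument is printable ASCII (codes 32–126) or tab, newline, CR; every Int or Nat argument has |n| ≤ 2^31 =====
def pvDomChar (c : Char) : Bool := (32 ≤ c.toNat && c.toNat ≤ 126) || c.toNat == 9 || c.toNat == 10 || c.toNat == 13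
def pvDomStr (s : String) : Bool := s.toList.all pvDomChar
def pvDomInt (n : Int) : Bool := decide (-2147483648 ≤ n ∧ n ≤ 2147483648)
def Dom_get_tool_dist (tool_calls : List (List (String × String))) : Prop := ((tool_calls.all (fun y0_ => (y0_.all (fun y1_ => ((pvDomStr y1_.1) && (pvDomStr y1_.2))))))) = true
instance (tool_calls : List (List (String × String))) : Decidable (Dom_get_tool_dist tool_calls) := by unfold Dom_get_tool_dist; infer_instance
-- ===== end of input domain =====

-- B replaces A's single-pass per-call if/elif chain by a sieve of staged passes: each bucket, in
-- priority order, counts and removes its matches from the pool of names; 'other' is the leftover (alternative).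


-- ===== PORT A =====
-- name = call.get('name', '').lower()
def gtdA_name (call : List (String × String)) : String :=
  PySem.Str.lower ((PySem.Dict.mk call).getD "name" "")

-- the body of A's for-loop: the if/elif chain incrementing one entry of dist
def gtdA_step (d : PySem.Dict String Int) (call : List (String × String)) : PySem.Dict String Int :=
  let name := gtdA_name call
  if ["read", "glob", "grep"].any (fun sub => PySem.Str.isIn sub name) then d.modify "read" 0 (· + 1)
  else if ["edit", "write"].any (fun sub => PySem.Str.isIn sub name) then d.modify "edit" 0 (· + 1)
  else if PySem.Str.isIn "bash" name then d.modify "bash" 0 (· + 1)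
  else if ["websearch", "webfetch"].any (fun sub => PySem.Str.isIn sub name) then d.modify "search" 0 (· + 1)
  else if PySem.Str.isIn "skill" name then d.modify "skill" 0 (· + 1)
  else d.modify "other" 0 (· + 1)

def get_tool_dist (tool_calls : List (List (String × String))) : List (String × Int) :=
  let dist : PySem.Dict String Int :=
    PySem.Dict.mk [("read", 0), ("edit", 0), ("bash", 0), ("search", 0), ("skill", 0), ("other", 0)]
  if tool_calls.isEmpty then dist.items
  else (tool_calls.foldl gtdA_step dist).items

-- ===== PORT B =====
def gtdB_buckets : List (String × List String) :=
  [("read", ["read", "glob", "grep"]), ("edit", ["edit", "write"]), ("bash", ["bash"]),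
   ("search", ["websearch", "webfetch"]), ("skill", ["skill"])]

-- any(s in n for s in subs)
def gtdB_match (subs : List String) (n : String) : Bool :=
  subs.any (fun s => PySem.Str.isIn s n)

-- B: sieve over a pool of lowered names; each bucket counts its matches and removes them
def get_tool_dist_alt (tool_calls : List (List (String × String))) : List (String × Int) :=
  let remaining := tool_calls.map (fun call => PySem.Str.lower ((PySem.Dict.mk call).getD "name" ""))
  let st := gtdB_buckets.foldl
    (fun (st : PySem.Dict String Int × List String) p =>
      (st.1.insert p.1 ((st.2.countP (gtdB_match p.2) : Int)),
       st.2.filter (fun n => ! gtdB_match p.2 n)))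
    (PySem.Dict.empty, remaining)
  (st.1.insert "other" ((st.2.length : Int))).items

-- ===== PRECONDITION & SPEC =====
def Spec_get_tool_dist (tool_calls : List (List (String × String))) (out : List (String × Int)) : Prop := out = get_tool_dist_alt tool_calls
instance (tool_calls : List (List (String × String))) (out : List (String × Int)) : Decidable (Spec_get_tool_dist tool_calls out) := by unfold Spec_get_tool_dist; infer_instance

-- ===== CLAIM (what is proved, stated in full; the proofs are below) =====
def Claim_equal_get_tool_dist : Prop := ∀ (tool_calls : List (List (String × String))), Dom_get_tool_dist tool_calls → Spec_get_tool_dist tool_calls (get_tool_dist tool_calls)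

-- ===== LEMMAS AND PROOFS =====

-- A's if/elif chain as a classifier (proof-side helper)
def gtdChain (name : String) : String :=
  if gtdB_match ["read", "glob", "grep"] name then "read"
  else if gtdB_match ["edit", "write"] name then "edit"
  else if gtdB_match ["bash"] name then "bash"
  else if gtdB_match ["websearch", "webfetch"] name then "search"
  else if gtdB_match ["skill"] name then "skill"
  else "other"

def gtdLabels (calls : List (List (String × String))) : List String :=
  calls.map (fun call => gtdChain (gtdA_name call))

-- one step of A's loop, written through the chain classifier
theorem gtdA_step_eq (call : List (String × String)) (a b c d e f : Int) :
    gtdA_step (PySem.Dict.mk [("read", a), ("edit", b), ("bash", c), ("search", d), ("skill", e), ("other", f)]) call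
      = PySem.Dict.mk [("read", if gtdChain (gtdA_name call) = "read" then a + 1 else a),
                       ("edit", if gtdChain (gtdA_name call) = "edit" then b + 1 else b),
                       ("bash", if gtdChain (gtdA_name call) = "bash" then c + 1 else c),
                       ("search", if gtdChain (gtdA_name call) = "search" then d + 1 else d),
                       ("skill", if gtdChain (gtdA_name call) = "skill" then e + 1 else e),
                       ("other", if gtdChain (gtdA_name call) = "other" then f + 1 else f)] := by
  rw [gtdA_step, gtdChain]
  simp only [gtdB_match, List.any_cons, List.any_nil, Bool.or_false]
  by_cases h1 : (["read", "glob", "grep"].any (fun sub => PySem.Str.isIn sub (gtdA_name call))) = true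
  · simp only [List.any_cons, List.any_nil, Bool.or_false] at h1; simp only [if_pos h1]; rfl
  · simp only [List.any_cons, List.any_nil, Bool.or_false] at h1; simp only [if_neg h1]
    by_cases h2 : (PySem.Str.isIn "edit" (gtdA_name call) || PySem.Str.isIn "write" (gtdA_name call)) = true
    · simp only [if_pos h2]; rfl
    · simp only [if_neg h2]
      by_cases h3 : PySem.Str.isIn "bash" (gtdA_name call) = true
      · simp only [if_pos h3]; rfl
      · simp only [if_neg h3]
        by_cases h4 : (PySem.Str.isIn "websearch" (gtdA_name call) || PySem.Str.isIn "webfetch" (gtdA_name call)) = true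
        · simp only [if_pos h4]; rfl
        · simp only [if_neg h4]
          by_cases h5 : PySem.Str.isIn "skill" (gtdA_name call) = true
          · simp only [if_pos h5]; rfl
          · simp only [if_neg h5]; rfl

theorem gtdChain_mem (name : String) :
    gtdChain name = "read" ∨ gtdChain name = "edit" ∨ gtdChain name = "bash" ∨
    gtdChain name = "search" ∨ gtdChain name = "skill" ∨ gtdChain name = "other" := by
  rw [gtdChain]; split_ifs <;> simp

-- A's fold, from the six-key dict with arbitrary counts, adds the number of labels in each bucket
theorem gtd_fold_eq (calls : List (List (String × String))) (a b c d e f : Int) :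
    (calls.foldl gtdA_step
        (PySem.Dict.mk [("read", a), ("edit", b), ("bash", c), ("search", d), ("skill", e), ("other", f)])).items
      = [("read", a + ((gtdLabels calls).count "read" : Int)),
         ("edit", b + ((gtdLabels calls).count "edit" : Int)),
         ("bash", c + ((gtdLabels calls).count "bash" : Int)),
         ("search", d + ((gtdLabels calls).count "search" : Int)),
         ("skill", e + ((gtdLabels calls).count "skill" : Int)),
         ("other", f + ((gtdLabels calls).count "other" : Int))] := by
  induction calls generalizing a b c d e f with
  | nil => simp [gtdLabels]
  | cons call rest ih =>
    have hlab : gtdLabels (call :: rest) = gtdChain (gtdA_name call) :: gtdLabels rest := by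
      simp [gtdLabels]
    rw [List.foldl_cons, gtdA_step_eq, ih, hlab]
    rcases gtdChain_mem (gtdA_name call) with hb | hb | hb | hb | hb | hb <;>
      simp [hb] <;> omega

-- the sieve's staged counts are the chain classifier's label counts
theorem gtd_sieve (L : List String) :
    L.countP (gtdB_match ["read", "glob", "grep"]) = (L.map gtdChain).count "read" ∧
    ((L.filter (fun n => ! gtdB_match ["read", "glob", "grep"] n)).countP (gtdB_match ["edit", "write"]))
      = (L.map gtdChain).count "edit" ∧
    (((L.filter (fun n => ! gtdB_match ["read", "glob", "grep"] n)).filter (fun n => ! gtdB_match ["edit", "write"] n)).countP (gtdB_match ["bash"]))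
      = (L.map gtdChain).count "bash" ∧
    ((((L.filter (fun n => ! gtdB_match ["read", "glob", "grep"] n)).filter (fun n => ! gtdB_match ["edit", "write"] n)).filter (fun n => ! gtdB_match ["bash"] n)).countP (gtdB_match ["websearch", "webfetch"]))
      = (L.map gtdChain).count "search" ∧
    (((((L.filter (fun n => ! gtdB_match ["read", "glob", "grep"] n)).filter (fun n => ! gtdB_match ["edit", "write"] n)).filter (fun n => ! gtdB_match ["bash"] n)).filter (fun n => ! gtdB_match ["websearch", "webfetch"] n)).countP (gtdB_match ["skill"]))
      = (L.map gtdChain).count "skill" ∧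
    ((((((L.filter (fun n => ! gtdB_match ["read", "glob", "grep"] n)).filter (fun n => ! gtdB_match ["edit", "write"] n)).filter (fun n => ! gtdB_match ["bash"] n)).filter (fun n => ! gtdB_match ["websearch", "webfetch"] n)).filter (fun n => ! gtdB_match ["skill"] n)).length)
      = (L.map gtdChain).count "other" := by
  induction L with
  | nil => simp
  | cons n L ih =>
    obtain ⟨i1, i2, i3, i4, i5, i6⟩ := ih
    by_cases h1 : gtdB_match ["read", "glob", "grep"] n = true
    · simp [gtdChain, h1, List.count_cons, i1, i2, i3, i4, i5, i6, -List.filter_filter]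
    · by_cases h2 : gtdB_match ["edit", "write"] n = true
      · simp [gtdChain, h1, h2, List.count_cons, i1, i2, i3, i4, i5, i6, -List.filter_filter]
      · by_cases h3 : gtdB_match ["bash"] n = true
        · simp [gtdChain, h1, h2, h3, List.count_cons, i1, i2, i3, i4, i5, i6, -List.filter_filter]
        · by_cases h4 : gtdB_match ["websearch", "webfetch"] n = true
          · simp [gtdChain, h1, h2, h3, h4, List.count_cons, i1, i2, i3, i4, i5, i6, -List.filter_filter]
          · by_cases h5 : gtdB_match ["skill"] n = true
            · simp [gtdChain, h1, h2, h3, h4, h5, List.count_cons, i1, i2, i3, i4, i5, i6, -List.filter_filter]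
            · simp [gtdChain, h1, h2, h3, h4, h5, List.count_cons, i1, i2, i3, i4, i5, i6, -List.filter_filter]

-- B in closed form: the six label counts, in insertion order
theorem gtd_alt_eq (tool_calls : List (List (String × String))) :
    get_tool_dist_alt tool_calls
      = [("read", ((gtdLabels tool_calls).count "read" : Int)),
         ("edit", ((gtdLabels tool_calls).count "edit" : Int)),
         ("bash", ((gtdLabels tool_calls).count "bash" : Int)),
         ("search", ((gtdLabels tool_calls).count "search" : Int)),
         ("skill", ((gtdLabels tool_calls).count "skill" : Int)),
         ("other", ((gtdLabels tool_calls).count "other" : Int))] := by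
  have hmap : tool_calls.map (fun call => PySem.Str.lower ((PySem.Dict.mk call).getD "name" ""))
      = tool_calls.map gtdA_name := rfl
  obtain ⟨s1, s2, s3, s4, s5, s6⟩ :=
    gtd_sieve (tool_calls.map (fun call => PySem.Str.lower ((PySem.Dict.mk call).getD "name" "")))
  have hlab : (tool_calls.map (fun call => PySem.Str.lower ((PySem.Dict.mk call).getD "name" ""))).map gtdChain
      = gtdLabels tool_calls := by simp [gtdLabels, gtdA_name, Function.comp]
  rw [hlab] at s1 s2 s3 s4 s5 s6
  simp only [get_tool_dist_alt, gtdB_buckets, List.foldl_cons, List.foldl_nil]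
  rw [s1, s2, s3, s4, s5, s6]
  rfl

-- ===== VERDICT (by name: the statement is the Claim_ definition above) =====
theorem get_tool_dist_spec : Claim_equal_get_tool_dist := by
  intro tool_calls _
  unfold Spec_get_tool_dist get_tool_dist
  rw [gtd_alt_eq]
  cases tool_calls with
  | nil => rfl
  | cons call rest =>
    simp only [List.isEmpty_cons, Bool.false_eq_true, if_false]
    rw [gtd_fold_eq]
    simp only [zero_add]
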